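-- pv_equiv track=rewrite | github.com/VRL10/Trabalho_Redes02_Aval02 | servidorConcorrente.py | analisar_requisicao_http
-- ===== SOURCE A (Python) =====
-- def analisar_requisicao_http(dados):
--     try:
--         linhas = dados.split('\r\n')
--         if not linhas:
--             return None, None, {}, ''
--
--         linha_requisicao = linhas[0]
--         partes = linha_requisicao.split()
--         if len(partes) < 3:
--             return None, None, {}, ''
--
--         metodo = partes[0]
--         caminho = partes[1]
--
--         cabecalhos = {}
--         corpo = ''
--         linha_vazia_encontrada = False
--
--         for linha in linhas[1:]:
--             if not linha:
--                 linha_vazia_encontrada = True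
--                 continue
--
--             if not linha_vazia_encontrada and ':' in linha:
--                 chave, valor = linha.split(':', 1)
--                 cabecalhos[chave.strip()] = valor.strip()
--             elif linha_vazia_encontrada:
--                 corpo += linha
--
--         return metodo, caminho, cabecalhos, corpo.strip()
--
--     except Exception as e:
--         return None, None, {}, ''
-- ===== SOURCE B (Python) =====
-- def analisar_requisicao_http(dados):
--     try:
--         linhas = dados.split('\r\n')
--         partes = linhas[0].split()
--         if len(partes) < 3:
--             return None, None, {}, ''
--         resto = linhas[1:]
--         try:
--             fronteira = resto.index('')
--         except ValueError:
--             fronteira = len(resto)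
--         cabecalhos = {}
--         for linha in resto[:fronteira]:
--             if ':' in linha:
--                 chave, valor = linha.split(':', 1)
--                 cabecalhos[chave.strip()] = valor.strip()
--         corpo = ''.join(l for l in resto[fronteira + 1:] if l)
--         return partes[0], partes[1], cabecalhos, corpo.strip()
--     except Exception:
--         return None, None, {}, ''
-- ===== Notes on version B (the rewrite author's own statement) =====
-- stated objective: alternative
-- what changed: A makes one stateful pass over the lines with a boolean flag, a growing dict and a growing body string; B instead locates the first empty line with list.index and processes the two regions separately: a header fold over the lines before it and a single separator-free join over the non-empty lines after it.
import Mathlib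
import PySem

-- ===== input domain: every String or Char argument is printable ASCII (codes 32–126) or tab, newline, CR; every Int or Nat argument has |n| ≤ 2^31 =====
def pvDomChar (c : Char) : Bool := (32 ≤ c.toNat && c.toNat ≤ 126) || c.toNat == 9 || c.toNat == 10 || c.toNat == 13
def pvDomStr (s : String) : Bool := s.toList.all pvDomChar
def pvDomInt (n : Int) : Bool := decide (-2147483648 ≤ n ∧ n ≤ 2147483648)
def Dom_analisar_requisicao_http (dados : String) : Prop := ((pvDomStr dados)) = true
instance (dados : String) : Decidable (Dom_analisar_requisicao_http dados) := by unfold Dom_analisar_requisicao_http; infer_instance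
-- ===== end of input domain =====

-- B replaces A's one stateful pass (flag + dict + growing body string) by locating the first
-- empty line with index? and processing the two regions separately (headers fold, body join);
-- objective: alternative decomposition, same cost.

-- ===== PORT A =====
-- 'corpo += linha' (Python str concatenation) is ported exactly as List Char append.
def analisar_requisicao_http (dados : String) : Option String × Option String × (List (String × String)) × String :=
  match PySem.Str.split? dados "\r\n" with
  | none => (none, none, [], "")   -- unreachable: the separator literal is nonempty
  | some linhas =>
    match linhas with
    | [] => (none, none, [], "")   -- 'if not linhas'
    | linha_requisicao :: resto =>
      let partes := PySem.Str.split₀ linha_requisicao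
      if partes.length < 3 then (none, none, [], "")
      else
        match partes with
        | metodo :: caminho :: _ =>
          let st := resto.foldl (fun (s : PySem.Dict String String × List Char × Bool) linha =>
            if linha = "" then (s.1, s.2.1, true)
            else if !s.2.2 && PySem.Str.isIn ":" linha then
              match PySem.Str.splitMax? linha ":" 1 with
              | some (chave :: valor :: _) =>
                  (s.1.insert (PySem.Str.strip chave) (PySem.Str.strip valor), s.2.1, s.2.2)
              | _ => s   -- unreachable: ':' ∈ linha gives two pieces
            else if s.2.2 then (s.1, s.2.1 ++ linha.toList, s.2.2)
            else s) (PySem.Dict.empty, ([] : List Char), false)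
          (some metodo, some caminho, st.1.items, String.ofList (PySem.Chars.strip st.2.1))
        | _ => (none, none, [], "")   -- unreachable: the length guard passed

-- ===== PORT B =====
-- 'chave, valor = linha.split(':', 1)' and the guarded 'partes[0]'/'partes[1]' are ported with
-- headD/tail; exact, since split(':', 1) with ':' present yields exactly two pieces (proved in
-- pv_splitMax_colon below) and partes has at least three elements past the guard.
def analisar_requisicao_http_alt (dados : String) : Option String × Option String × (List (String × String)) × String :=
  let linhas := (PySem.Str.split? dados "\r\n").getD []   -- separator literal nonempty, never none
  let linha0 := linhas.headD ""                            -- linhas[0]: split always returns ≥ 1 piece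
  let resto := linhas.tail                                 -- linhas[1:]
  let partes := PySem.Str.split₀ linha0
  if partes.length < 3 then (none, none, [], "")
  else
    let metodo := partes.headD ""
    let caminho := partes.tail.headD ""
    let fronteira := (PySem.List.index? resto "").getD resto.length
    let cabecalhos := (resto.take fronteira).foldl (fun (d : PySem.Dict String String) linha =>
        if PySem.Str.isIn ":" linha then
          let ps := (PySem.Str.splitMax? linha ":" 1).getD []
          d.insert (PySem.Str.strip (ps.headD "")) (PySem.Str.strip (ps.tail.headD ""))
        else d) PySem.Dict.empty
    let corpo := PySem.Chars.join [] (((resto.drop (fronteira + 1)).filter (· ≠ "")).map String.toList)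
    (some metodo, some caminho, cabecalhos.items, String.ofList (PySem.Chars.strip corpo))

-- ===== PRECONDITION & SPEC =====
def Spec_analisar_requisicao_http (dados : String) (out : Option String × Option String × (List (String × String)) × String) : Prop := out = analisar_requisicao_http_alt dados
instance (dados : String) (out : Option String × Option String × (List (String × String)) × String) : Decidable (Spec_analisar_requisicao_http dados out) := by unfold Spec_analisar_requisicao_http; infer_instance

-- ===== CLAIM (what is proved, stated in full; the proofs are below) =====
def Claim_equal_analisar_requisicao_http : Prop := ∀ (dados : String), Dom_analisar_requisicao_http dados → Spec_analisar_requisicao_http dados (analisar_requisicao_http dados)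

-- ===== LEMMAS AND PROOFS =====

-- str.split with maxsplit 0 splits nothing: the remainder is one piece
theorem pv_go_zero (sep : List Char) : ∀ (fuel : Nat) (l cur : List Char) (acc : List (List Char)),
    PySem.Chars.splitOnMax.go sep fuel 0 l cur acc = ((cur.reverse ++ l) :: acc).reverse
  | 0, l, cur, acc => rfl
  | fuel+1, [], cur, acc => by simp [PySem.Chars.splitOnMax.go]
  | fuel+1, c :: rest, cur, acc => by simp [PySem.Chars.splitOnMax.go]

-- str.split with maxsplit 1 on a string containing the separator: exactly two pieces
theorem pv_go_one (sep : List Char) (hsep : sep ≠ []) :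
    ∀ (fuel : Nat) (l cur : List Char) (acc : List (List Char)), l.length < fuel → sep <:+: l →
    ∃ a b, PySem.Chars.splitOnMax.go sep fuel 1 l cur acc = (b :: a :: acc).reverse
  | 0, l, cur, acc, hf, _ => absurd hf (by omega)
  | fuel+1, [], cur, acc, hf, hin => by
    exact absurd (List.eq_nil_of_infix_nil hin) hsep
  | fuel+1, c :: rest, cur, acc, hf, hin => by
    by_cases hp : sep.isPrefixOf (c :: rest)
    · refine ⟨cur.reverse, List.drop sep.length (c :: rest), ?_⟩
      simp only [PySem.Chars.splitOnMax.go]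
      rw [if_neg (by norm_num), if_pos hp, pv_go_zero]
      simp
    · obtain ⟨s, t, he⟩ := hin
      have hs : s ≠ [] := by
        rintro rfl
        exact hp ((List.isPrefixOf_iff_prefix).mpr ⟨t, by simpa using he⟩)
      obtain ⟨s0, s', rfl⟩ := List.exists_cons_of_ne_nil hs
      have he' : rest = s' ++ sep ++ t := by
        have h2 := he
        simp at h2
        simp [← h2.2]
      have hin' : sep <:+: rest := ⟨s', t, he'.symm⟩
      obtain ⟨a, b, hab⟩ := pv_go_one sep hsep fuel rest (c :: cur) acc (by simp at hf ⊢; omega) hin'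
      refine ⟨a, b, ?_⟩
      simp only [PySem.Chars.splitOnMax.go]
      rw [if_neg (by norm_num), if_neg hp]
      exact hab

theorem pv_splitMax_colon (x : String) (h : PySem.Str.isIn ":" x = true) :
    ∃ a b : String, PySem.Str.splitMax? x ":" 1 = some [a, b] := by
  have hin : (":".toList) <:+: x.toList := (PySem.Str.isIn_iff_infix _ _).mp h
  obtain ⟨a, b, hab⟩ := pv_go_one (":".toList) (by simp) (x.toList.length + 1) x.toList [] []
    (by omega) hin
  refine ⟨String.ofList a, String.ofList b, ?_⟩
  simp at hab
  simp [PySem.Str.splitMax?, PySem.Chars.splitMax?, PySem.Chars.splitOnMax, hab]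

-- ''.join with an empty separator is concatenation
theorem pv_join_nil_flatten : ∀ (ls : List (List Char)), PySem.Chars.join [] ls = ls.flatten
  | [] => rfl
  | [x] => by unfold PySem.Chars.join List.intercalate; simp
  | x :: y :: t => by
    have ih := pv_join_nil_flatten (y :: t)
    unfold PySem.Chars.join List.intercalate at ih ⊢
    rw [List.intersperse_cons₂]
    simp only [List.flatten_cons, List.nil_append, ih]

-- A's loop over a region with no empty line: only headers grow, flag stays false
theorem pv_foldA_no_empty : ∀ (l : List String) (d : PySem.Dict String String) (corpo : List Char), "" ∉ l →
    l.foldl (fun (s : PySem.Dict String String × List Char × Bool) linha =>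
            if linha = "" then (s.1, s.2.1, true)
            else if !s.2.2 && PySem.Str.isIn ":" linha then
              match PySem.Str.splitMax? linha ":" 1 with
              | some (chave :: valor :: _) =>
                  (s.1.insert (PySem.Str.strip chave) (PySem.Str.strip valor), s.2.1, s.2.2)
              | _ => s
            else if s.2.2 then (s.1, s.2.1 ++ linha.toList, s.2.2)
            else s) (d, corpo, false)
    = (l.foldl (fun (d : PySem.Dict String String) linha =>
            if PySem.Str.isIn ":" linha then
              let ps := (PySem.Str.splitMax? linha ":" 1).getD []
              d.insert (PySem.Str.strip (ps.headD "")) (PySem.Str.strip (ps.tail.headD ""))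
            else d) d, corpo, false)
  | [], d, corpo, _ => rfl
  | x :: t, d, corpo, h => by
    have hx : ¬ (x = "") := fun he => h (he ▸ List.mem_cons_self ..)
    have ht : "" ∉ t := fun he => h (List.mem_cons_of_mem _ he)
    simp only [List.foldl_cons, if_neg hx, Bool.not_false, Bool.true_and]
    by_cases hc : PySem.Str.isIn ":" x
    · obtain ⟨a, b, hab⟩ := pv_splitMax_colon x hc
      simp only [hc, if_pos, hab, Option.getD_some, List.headD_cons, List.tail_cons]
      exact pv_foldA_no_empty t _ corpo ht
    · simp only [hc]
      simp only [Bool.false_eq_true, if_false]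
      exact pv_foldA_no_empty t d corpo ht

-- A's loop once the flag is set: headers frozen, non-empty lines concatenated into corpo
theorem pv_foldA_after_empty : ∀ (l : List String) (d : PySem.Dict String String) (corpo : List Char),
    l.foldl (fun (s : PySem.Dict String String × List Char × Bool) linha =>
            if linha = "" then (s.1, s.2.1, true)
            else if !s.2.2 && PySem.Str.isIn ":" linha then
              match PySem.Str.splitMax? linha ":" 1 with
              | some (chave :: valor :: _) =>
                  (s.1.insert (PySem.Str.strip chave) (PySem.Str.strip valor), s.2.1, s.2.2)
              | _ => s
            else if s.2.2 then (s.1, s.2.1 ++ linha.toList, s.2.2)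
            else s) (d, corpo, true)
    = (d, corpo ++ (l.filter (· ≠ "")).flatMap String.toList, true)
  | [], d, corpo => by simp
  | x :: t, d, corpo => by
    by_cases hx : x = ""
    · subst hx
      simp only [List.foldl_cons, if_true]
      rw [pv_foldA_after_empty t d corpo]
      simp
    · simp only [List.foldl_cons, if_neg hx, Bool.not_true, Bool.false_and,
        Bool.false_eq_true, if_false, if_pos]
      rw [pv_foldA_after_empty t d (corpo ++ x.toList)]
      simp [hx]

-- A's whole loop, characterised by the position of the first empty line
theorem pv_core (resto : List String) :
    resto.foldl (fun (s : PySem.Dict String String × List Char × Bool) linha =>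
            if linha = "" then (s.1, s.2.1, true)
            else if !s.2.2 && PySem.Str.isIn ":" linha then
              match PySem.Str.splitMax? linha ":" 1 with
              | some (chave :: valor :: _) =>
                  (s.1.insert (PySem.Str.strip chave) (PySem.Str.strip valor), s.2.1, s.2.2)
              | _ => s
            else if s.2.2 then (s.1, s.2.1 ++ linha.toList, s.2.2)
            else s) (PySem.Dict.empty, ([] : List Char), false)
    = ((resto.take ((PySem.List.index? resto "").getD resto.length)).foldl
          (fun (d : PySem.Dict String String) linha =>
            if PySem.Str.isIn ":" linha then
              let ps := (PySem.Str.splitMax? linha ":" 1).getD []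
              d.insert (PySem.Str.strip (ps.headD "")) (PySem.Str.strip (ps.tail.headD ""))
            else d) PySem.Dict.empty,
       ((resto.drop ((PySem.List.index? resto "").getD resto.length + 1)).filter (· ≠ "")).flatMap String.toList,
       decide ("" ∈ resto)) := by
  by_cases hm : "" ∈ resto
  · have h1 := (PySem.List.index?_isSome_iff resto "").mpr hm
    obtain ⟨k, hk⟩ := Option.isSome_iff_exists.mp h1
    obtain ⟨pre, suf, he, hl, hnp⟩ := (PySem.List.index?_eq_some_iff _ _ _).mp hk
    subst he; subst hl
    rw [hk]
    simp only [Option.getD_some]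
    have hdrop : (pre ++ "" :: suf).drop (pre.length + 1) = suf := by
      rw [show pre ++ "" :: suf = (pre ++ [""]) ++ suf by simp,
          show pre.length + 1 = (pre ++ [""]).length by simp]
      exact List.drop_left
    rw [List.foldl_append, pv_foldA_no_empty pre _ _ hnp, List.foldl_cons, if_pos rfl,
        pv_foldA_after_empty, List.take_left, hdrop]
    simp [hm]
  · rw [(PySem.List.index?_eq_none_iff _ _).mpr hm]
    simp only [Option.getD_none, List.take_length]
    rw [pv_foldA_no_empty resto _ _ hm]
    simp [hm, List.drop_eq_nil_of_le (Nat.le_succ_of_le (Nat.le_refl _))]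

-- ===== VERDICT (by name: the statement is the Claim_ definition above) =====
theorem analisar_requisicao_http_spec : Claim_equal_analisar_requisicao_http := by
  intro dados _
  unfold Spec_analisar_requisicao_http analisar_requisicao_http analisar_requisicao_http_alt
  cases hs : PySem.Str.split? dados "\r\n" with
  | none => rfl
  | some linhas =>
    cases linhas with
    | nil => rfl
    | cons l0 resto =>
      simp only [Option.getD_some, List.headD_cons, List.tail_cons]
      by_cases hlen : (PySem.Str.split₀ l0).length < 3
      · simp [hlen]
      · simp only [if_neg hlen]
        cases hp : PySem.Str.split₀ l0 with
        | nil => rw [hp] at hlen; exact absurd (by norm_num) hlen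
        | cons a t =>
          cases t with
          | nil => rw [hp] at hlen; exact absurd (by norm_num) hlen
          | cons b rest =>
            simp only [pv_core, pv_join_nil_flatten, List.flatMap_def, List.headD_cons,
              List.tail_cons]
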